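-- pv_equiv track=rewrite | github.com/qbzdm2024/Zhihong.github.io | omaha_mapping/time_analysis.py | split_label
-- ===== SOURCE A (Python) =====
-- from typing import Dict, List, Optional, Tuple
--
-- CATEGORY_CANONICAL = {
--     "Health Teaching, Guidance, and Counseling": "Teaching, Guidance, and Counseling",
-- }
--
-- def split_label(label: str) -> Tuple[str, str]:
--     """'Surveillance_signs/symptoms-physical' → ('Surveillance', 'signs/symptoms-physical')."""
--     known = [
--         "Health Teaching, Guidance, and Counseling",
--         "Teaching, Guidance, and Counseling",
--         "Treatments and Procedures",
--         "Case Management",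
--         "Surveillance",
--     ]
--     for cat in known:
--         if label.startswith(cat + "_"):
--             tgt = label[len(cat) + 1:]
--             cat = CATEGORY_CANONICAL.get(cat, cat)
--             return cat, tgt
--     # Fallback: first underscore
--     parts = label.split("_", 1)
--     cat = CATEGORY_CANONICAL.get(parts[0], parts[0])
--     return (cat, parts[1]) if len(parts) == 2 else (label, "unknown")
-- ===== SOURCE B (Python) =====
-- CATEGORY_CANONICAL = {
--     "Health Teaching, Guidance, and Counseling": "Teaching, Guidance, and Counseling",
-- }
--
-- def split_label(label: str):
--     """'Surveillance_signs/symptoms-physical' → ('Surveillance', 'signs/symptoms-physical')."""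
--     head, sep, tail = label.partition("_")
--     if sep:
--         return (CATEGORY_CANONICAL.get(head, head), tail)
--     return (label, "unknown")
-- ===== Notes on version B (the rewrite author's own statement) =====
-- stated objective: simpler
-- what changed: The prefix-scan loop over the five known categories is removed entirely: since no known category contains an underscore, a single partition at the first underscore plus the same canonical-map lookup reproduces A exactly, so B is one partition and one lookup.
import Mathlib
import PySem

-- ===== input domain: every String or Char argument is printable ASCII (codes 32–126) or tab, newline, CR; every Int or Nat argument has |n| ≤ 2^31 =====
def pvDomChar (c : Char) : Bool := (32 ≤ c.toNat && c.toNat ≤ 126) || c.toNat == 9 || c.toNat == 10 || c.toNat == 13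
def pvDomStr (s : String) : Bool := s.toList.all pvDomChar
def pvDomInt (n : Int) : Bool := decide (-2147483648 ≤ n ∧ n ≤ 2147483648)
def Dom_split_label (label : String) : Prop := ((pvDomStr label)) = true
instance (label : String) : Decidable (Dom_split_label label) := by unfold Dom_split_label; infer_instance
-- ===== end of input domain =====

-- B replaces A's prefix-scan loop over the five known categories by a single partition
-- at the first underscore plus the same canonical-map lookup (objective: simpler).

-- module constant CATEGORY_CANONICAL (used by both Python versions)
def pvCategoryCanonical : PySem.Dict String String :=
  (PySem.Dict.empty).insert "Health Teaching, Guidance, and Counseling"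
    "Teaching, Guidance, and Counseling"

-- ===== PORT A =====
-- the `known` list literal of A
def pvKnown : List String :=
  [ "Health Teaching, Guidance, and Counseling"
  , "Teaching, Guidance, and Counseling"
  , "Treatments and Procedures"
  , "Case Management"
  , "Surveillance" ]

-- the `for cat in known:` loop of A; falls through to the first-underscore split fallback
def split_label_loop (label : String) : List String → String × String
  | [] =>
      -- parts = label.split("_", 1)  (sep ≠ "", so the total Chars.splitOnMax form is exact)
      let parts := PySem.Chars.splitOnMax label.toList ['_'] 1
      match parts with
      | [p0, p1] =>
          (PySem.Dict.getD pvCategoryCanonical (String.ofList p0) (String.ofList p0),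
           String.ofList p1)
      | _ => (label, "unknown")
  | cat :: rest =>
      if PySem.Str.startswith label (cat ++ "_") then
        let tgt := PySem.Str.slice label (some (PySem.Str.len cat + 1)) none
        (PySem.Dict.getD pvCategoryCanonical cat cat, tgt)
      else split_label_loop label rest

def split_label (label : String) : String × String :=
  split_label_loop label pvKnown

-- ===== PORT B =====
-- head, sep, tail = label.partition("_") ported by hand (exact: str.partition splits at the
-- FIRST occurrence of the separator, which Chars.find locates; find = -1 means empty sep part)
def split_label_alt (label : String) : String × String :=
  let cs := label.toList
  let i := PySem.Chars.find cs ['_']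
  if i = -1 then (label, "unknown")
  else
    let head := String.ofList (cs.take i.toNat)
    (PySem.Dict.getD pvCategoryCanonical head head,
     String.ofList (cs.drop (i.toNat + 1)))

-- ===== PRECONDITION & SPEC =====
def Spec_split_label (label : String) (out : String × String) : Prop := out = split_label_alt label
instance (label : String) (out : String × String) : Decidable (Spec_split_label label out) := by unfold Spec_split_label; infer_instance

-- ===== CLAIM (what is proved, stated in full; the proofs are below) =====
def Claim_equal_split_label : Prop := ∀ (label : String), Dom_split_label label → Spec_split_label label (split_label label)

-- ===== LEMMAS AND PROOFS =====

-- the splitOnMax worker with maxsplit exhausted returns the rest as one piece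
theorem pv_go_zero (fuel : Nat) (l cur : List Char) (acc : List (List Char)) :
    PySem.Chars.splitOnMax.go ['_'] fuel 0 l cur acc = ((cur.reverse ++ l) :: acc).reverse := by
  cases fuel with
  | zero => rfl
  | succ n => cases l with
    | nil => simp [PySem.Chars.splitOnMax.go]
    | cons c rest => simp [PySem.Chars.splitOnMax.go]

-- the worker scans an underscore-free list without splitting
theorem pv_go_clean (l : List Char) : ∀ (fuel : Nat) (cur : List Char)
    (acc : List (List Char)), l.length < fuel → '_' ∉ l →
    PySem.Chars.splitOnMax.go ['_'] fuel 1 l cur acc = ((cur.reverse ++ l) :: acc).reverse := by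
  induction l with
  | nil =>
      intro fuel cur acc hf _
      cases fuel with
      | zero => omega
      | succ n => simp [PySem.Chars.splitOnMax.go]
  | cons c rest ih =>
      intro fuel cur acc hf hm
      cases fuel with
      | zero => omega
      | succ n =>
        have hc : c ≠ '_' := by intro h; exact hm (h ▸ List.mem_cons_self)
        have hpre : (['_'].isPrefixOf (c :: rest)) = false := by
          simp [List.isPrefixOf]; exact fun h => (hc h.symm).elim
        rw [PySem.Chars.splitOnMax.go]
        rw [if_neg (by omega), if_neg (by rw [hpre]; simp)]
        rw [ih n (c :: cur) acc (by simpa using Nat.lt_of_succ_lt_succ hf)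
          (fun h => hm (List.mem_cons_of_mem _ h))]
        simp

-- the worker splits once at the first underscore
theorem pv_go_split (p : List Char) : ∀ (fuel : Nat) (q cur : List Char)
    (acc : List (List Char)), p.length < fuel → '_' ∉ p →
    PySem.Chars.splitOnMax.go ['_'] fuel 1 (p ++ '_' :: q) cur acc
      = (q :: (cur.reverse ++ p) :: acc).reverse := by
  induction p with
  | nil =>
      intro fuel q cur acc hf _
      cases fuel with
      | zero => omega
      | succ n =>
        rw [List.nil_append, PySem.Chars.splitOnMax.go]
        have hpre : (['_'].isPrefixOf ('_' :: q)) = true := by simp [List.isPrefixOf]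
        simp only [hpre, if_true]
        rw [pv_go_zero]
        simp
  | cons c rest ih =>
      intro fuel q cur acc hf hm
      cases fuel with
      | zero => omega
      | succ n =>
        have hc : c ≠ '_' := by intro h; exact hm (h ▸ List.mem_cons_self)
        have hpre : (['_'].isPrefixOf (c :: (rest ++ '_' :: q))) = false := by
          simp [List.isPrefixOf]; exact fun h => (hc h.symm).elim
        rw [List.cons_append, PySem.Chars.splitOnMax.go]
        rw [if_neg (by omega), if_neg (by rw [hpre]; simp)]
        rw [ih n q (c :: cur) acc (by simpa using Nat.lt_of_succ_lt_succ hf)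
          (fun h => hm (List.mem_cons_of_mem _ h))]
        simp

theorem pv_split_clean (cs : List Char) (h : '_' ∉ cs) :
    PySem.Chars.splitOnMax cs ['_'] 1 = [cs] := by
  unfold PySem.Chars.splitOnMax
  rw [if_neg (by omega)]
  show PySem.Chars.splitOnMax.go ['_'] (cs.length + 1) 1 cs [] [] = [cs]
  rw [pv_go_clean cs (cs.length + 1) [] [] (by omega) h]
  simp

theorem pv_split_at (p q : List Char) (h : '_' ∉ p) :
    PySem.Chars.splitOnMax (p ++ '_' :: q) ['_'] 1 = [p, q] := by
  unfold PySem.Chars.splitOnMax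
  rw [if_neg (by omega)]
  show PySem.Chars.splitOnMax.go ['_'] ((p ++ '_' :: q).length + 1) 1 (p ++ '_' :: q) [] [] = [p, q]
  rw [pv_go_split p ((p ++ '_' :: q).length + 1) q [] [] (by simp) h]
  simp

-- B's find-based case analysis, packaged: no underscore
theorem pv_alt_clean (label : String) (h : '_' ∉ label.toList) :
    split_label_alt label = (label, "unknown") := by
  unfold split_label_alt
  rw [if_pos]
  rw [PySem.Chars.find_eq_neg_one_iff]
  rw [List.singleton_infix_iff]
  exact h

-- find locates the first underscore of p ++ '_' :: q when p is underscore-free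
theorem pv_find_at (p q : List Char) (hp : '_' ∉ p) :
    PySem.Chars.find (p ++ '_' :: q) ['_'] = (p.length : Int) := by
  set cs := p ++ '_' :: q with hcs
  have h0 : 0 ≤ PySem.Chars.find cs ['_'] := by
    rw [PySem.Chars.find_nonneg_iff, List.singleton_infix_iff]
    simp [hcs]
  obtain ⟨hpre, hmin⟩ := PySem.Chars.find_spec h0
  set n := (PySem.Chars.find cs ['_']).toNat with hn
  have hnp : n = p.length := by
    rcases Nat.lt_trichotomy n p.length with hlt | heq | hgt
    · exfalso
      obtain ⟨t, ht⟩ := hpre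
      have hd : cs.drop n = '_' :: t := by rw [← ht]; rfl
      have hd2 : cs.drop n = p.drop n ++ '_' :: q := by
        rw [hcs, List.drop_append_of_le_length (Nat.le_of_lt hlt)]
      have hdp : p.drop n = p[n] :: p.drop (n + 1) := List.drop_eq_getElem_cons hlt
      rw [hd2, hdp, List.cons_append] at hd
      have : p[n] = '_' := by injection hd
      exact hp (this ▸ List.getElem_mem hlt)
    · exact heq
    · exfalso
      apply hmin p.length hgt
      refine ⟨q, ?_⟩
      rw [hcs, List.drop_left]
      rfl
  calc PySem.Chars.find cs ['_'] = (n : Int) := (Int.toNat_of_nonneg h0).symm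
    _ = (p.length : Int) := by rw [hnp]

-- B's value when there is an underscore, expressed through the decomposition
theorem pv_alt_split (label : String) (p q : List Char)
    (hdec : label.toList = p ++ '_' :: q) (hp : '_' ∉ p) :
    split_label_alt label =
      (PySem.Dict.getD pvCategoryCanonical (String.ofList p) (String.ofList p),
       String.ofList q) := by
  unfold split_label_alt
  dsimp only
  rw [hdec, pv_find_at p q hp]
  rw [if_neg (by omega)]
  have h1 : ((p.length : Int)).toNat = p.length := Int.toNat_natCast p.length
  rw [h1]
  have htake : (p ++ '_' :: q).take p.length = p := List.take_left
  have hdrop : (p ++ '_' :: q).drop (p.length + 1) = q := by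
    have : p ++ '_' :: q = (p ++ ['_']) ++ q := by simp
    rw [this, show p.length + 1 = (p ++ ['_']).length by simp, List.drop_left]
  rw [htake, hdrop]

-- first-occurrence decomposition of a list containing '_'
theorem pv_first (cs : List Char) (h : '_' ∈ cs) :
    ∃ p q, cs = p ++ '_' :: q ∧ '_' ∉ p := by
  induction cs with
  | nil => cases h
  | cons c rest ih =>
      by_cases hc : c = '_'
      · exact ⟨[], rest, by rw [hc]; rfl, by simp⟩
      · obtain ⟨p, q, h1, h2⟩ := ih (by
          rcases List.mem_cons.mp h with h' | h'
          · exact absurd h'.symm hc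
          · exact h')
        exact ⟨c :: p, q, by rw [List.cons_append, h1], by
          intro hm
          rcases List.mem_cons.mp hm with h' | h'
          · exact hc h'.symm
          · exact h2 h'⟩

-- the fallback branch of A equals B on every label
theorem pv_fallback (label : String) :
    (match PySem.Chars.splitOnMax label.toList ['_'] 1 with
      | [p0, p1] =>
          (PySem.Dict.getD pvCategoryCanonical (String.ofList p0) (String.ofList p0),
           String.ofList p1)
      | _ => (label, "unknown")) = split_label_alt label := by
  by_cases h : '_' ∈ label.toList
  · obtain ⟨p, q, hdec, hp⟩ := pv_first label.toList h
    rw [pv_alt_split label p q hdec hp]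
    conv_lhs => rw [hdec, pv_split_at p q hp]
  · rw [pv_split_clean label.toList h, pv_alt_clean label h]

-- a matching startswith branch of A equals B, for any underscore-free category
theorem pv_branch (label cat : String) (hcat : '_' ∉ cat.toList)
    (h : PySem.Str.startswith label (cat ++ "_") = true) :
    (PySem.Dict.getD pvCategoryCanonical cat cat,
     PySem.Str.slice label (some (PySem.Str.len cat + 1)) none) = split_label_alt label := by
  have hpre : cat.toList ++ ['_'] <+: label.toList := by
    have h' := h
    simp only [PySem.Str.startswith_eq] at h'
    rw [PySem.Chars.startswith_iff] at h'
    simpa using h'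
  obtain ⟨q, hq⟩ := hpre
  have hdec : label.toList = cat.toList ++ '_' :: q := by rw [← hq]; simp
  rw [pv_alt_split label _ _ hdec hcat]
  rw [String.ofList_toList]
  refine Prod.ext rfl ?_
  show PySem.Str.slice label (some (PySem.Str.len cat + 1)) none = String.ofList q
  apply String.toList_inj.mp
  rw [PySem.Str.toList_slice]
  simp only [PySem.Chars.slice_eq_listSlice]
  rw [show (PySem.Str.len cat + 1 : Int) = ((cat.toList.length + 1 : Nat) : Int) by
    simp [PySem.Str.len]]
  rw [PySem.List.slice_from_natCast]
  rw [hdec]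
  rw [show cat.toList ++ '_' :: q = (cat.toList ++ ['_']) ++ q from by simp]
  rw [show cat.toList.length + 1 = (cat.toList ++ ['_']).length from by simp]
  rw [List.drop_left]
  simp

-- ===== VERDICT (by name: the statement is the Claim_ definition above) =====
theorem split_label_spec : Claim_equal_split_label := by
  intro label _
  unfold Spec_split_label split_label pvKnown
  simp only [split_label_loop]
  split_ifs with h1 h2 h3 h4 h5
  · exact pv_branch label _ (by decide) h1
  · exact pv_branch label _ (by decide) h2
  · exact pv_branch label _ (by decide) h3
  · exact pv_branch label _ (by decide) h4
  · exact pv_branch label _ (by decide) h5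
  · exact pv_fallback label
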